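-- pv_equiv track=rewrite | github.com/soumyendra98/DSA | Greedy/LeetCode/Reducing Dishes.py | maxSatisfaction
-- ===== SOURCE A (Python) =====
-- from typing import List
--
-- def maxSatisfaction(satisfaction: List[int]) -> int:
--     satisfaction.sort(reverse=True)
--     n = len(satisfaction)
--     prefix = output = 0
--     for i in range(n):
--         prefix += satisfaction[i]
--         if prefix < 0:
--             break
--         output += prefix
--
--     return output
-- ===== SOURCE B (Python) =====
-- from typing import List
--
-- def maxSatisfaction(satisfaction: List[int]) -> int:
--     # Note: like A, sorts the argument in place (descending).
--     satisfaction.sort(reverse=True)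
--     n = len(satisfaction)
--     best = 0
--     for k in range(1, n + 1):
--         total = 0
--         for i in range(k):
--             total += satisfaction[i] * (k - i)
--         if total > best:
--             best = total
--     return best
-- ===== Notes on version B (the rewrite author's own statement) =====
-- stated objective: alternative
-- what changed: Instead of A's single incremental prefix-sum pass with an early break, B takes the maximum over all prefix lengths k of the weighted sum sum_i a_i*(k-i), recomputed from scratch for each k by a nested loop.
import Mathlib
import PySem

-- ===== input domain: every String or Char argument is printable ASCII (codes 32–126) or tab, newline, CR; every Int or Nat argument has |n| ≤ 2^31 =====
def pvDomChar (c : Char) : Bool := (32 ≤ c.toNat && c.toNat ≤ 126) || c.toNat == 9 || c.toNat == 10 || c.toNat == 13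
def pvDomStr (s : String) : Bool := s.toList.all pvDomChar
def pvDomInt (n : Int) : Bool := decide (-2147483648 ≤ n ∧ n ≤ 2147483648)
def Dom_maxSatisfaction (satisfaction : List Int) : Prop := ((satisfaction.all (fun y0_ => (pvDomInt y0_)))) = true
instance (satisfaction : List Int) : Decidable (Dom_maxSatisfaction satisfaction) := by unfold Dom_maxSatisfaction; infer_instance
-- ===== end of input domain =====

-- B replaces A's incremental prefix-sum pass with early break by a maximum over all prefix
-- lengths k of the weighted sum Σ aᵢ·(k−i), recomputed by a nested loop (alternative, not faster).
-- Both Pythons sort the argument in place (identically); the equivalence proved is about the return value.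

-- ===== PORT A =====
-- 'for i in range(n): prefix += satisfaction[i]; if prefix < 0: break; output += prefix'
-- as the obvious structural recursion over the sorted list's elements, carrying (prefix, output)
def pvLoopA : List Int → Int → Int → Int
  | [], _, output => output
  | x :: xs, pfx, output =>
      let p := pfx + x
      if p < 0 then output else pvLoopA xs p (output + p)

def maxSatisfaction (satisfaction : List Int) : Int :=
  let s := PySem.List.sorted satisfaction (fun x => x) true
  pvLoopA s 0 0

-- ===== PORT B =====
-- inner loop: total = Σ_{i<k} s[i]*(k-i)
def pvTotalB (s : List Int) (k : Int) : Int :=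
  (PySem.List.pyRange 0 k).foldl (fun total i => total + PySem.List.pyGetD s i 0 * (k - i)) 0

def maxSatisfaction_alt (satisfaction : List Int) : Int :=
  let s := PySem.List.sorted satisfaction (fun x => x) true
  (PySem.List.pyRange 1 (PySem.List.len s + 1)).foldl
    (fun best k =>
      let total := pvTotalB s k
      if total > best then total else best) 0

-- ===== PRECONDITION & SPEC =====
def Spec_maxSatisfaction (satisfaction : List Int) (out : Int) : Prop := out = maxSatisfaction_alt satisfaction
instance (satisfaction : List Int) (out : Int) : Decidable (Spec_maxSatisfaction satisfaction out) := by unfold Spec_maxSatisfaction; infer_instance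

-- ===== CLAIM (what is proved, stated in full; the proofs are below) =====
def Claim_equal_maxSatisfaction : Prop := ∀ (satisfaction : List Int), Dom_maxSatisfaction satisfaction → Spec_maxSatisfaction satisfaction (maxSatisfaction satisfaction)

-- ===== LEMMAS AND PROOFS =====

-- sum of the first k elements
def pvSN (s : List Int) (k : Nat) : Int := (s.take k).sum

-- W k = Σ_{j=1..k} (sum of first j elements)
def pvWW (s : List Int) : Nat → Int
  | 0 => 0
  | k + 1 => pvWW s k + pvSN s (k + 1)

-- the same quantity, shifted by a running offset p, in head-peeling form
def pvWp : List Int → Int → Nat → Int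
  | _, _, 0 => 0
  | [], _, _ + 1 => 0
  | x :: xs, p, k + 1 => (p + x) + pvWp xs (p + x) k

-- recursive form of max_{0 ≤ k ≤ |s|} pvWp s p k
def pvM : List Int → Int → Int
  | [], _ => 0
  | x :: xs, p => max 0 ((p + x) + pvM xs (p + x))

-- iterative form of the same maximum, up to length m
def pvNMax (s : List Int) (p : Int) : Nat → Int
  | 0 => 0
  | m + 1 => max (pvNMax s p m) (pvWp s p (m + 1))

-- B's outer loop in Nat form
def pvBMax (s : List Int) : Nat → Int
  | 0 => 0
  | m + 1 => if pvWW s (m + 1) > pvBMax s m then pvWW s (m + 1) else pvBMax s m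

lemma pvM_nonneg (s : List Int) (p : Int) : 0 ≤ pvM s p := by
  cases s with
  | nil => simp [pvM]
  | cons x xs => simp [pvM]

lemma pvM_neg (s : List Int) (p : Int) (hs : ∀ y ∈ s, y ≤ 0) (hp : p < 0) : pvM s p = 0 := by
  induction s generalizing p with
  | nil => rfl
  | cons x xs ih =>
      have hx : x ≤ 0 := hs x (by simp)
      have : pvM xs (p + x) = 0 := ih (p + x) (fun y hy => hs y (by simp [hy])) (by omega)
      simp [pvM, this]
      omega

lemma pvLoopA_eq (s : List Int) (p out : Int)
    (hsort : s.Pairwise (fun a b => b ≤ a)) (hp : 0 ≤ p) :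
    pvLoopA s p out = out + pvM s p := by
  induction s generalizing p out with
  | nil => simp [pvLoopA, pvM]
  | cons x xs ih =>
      rcases List.pairwise_cons.mp hsort with ⟨hhead, htail⟩
      by_cases hneg : p + x < 0
      · have hx : x < 0 := by omega
        have hz : pvM xs (p + x) = 0 :=
          pvM_neg xs (p + x) (fun y hy => le_trans (hhead y hy) (le_of_lt hx)) hneg
        simp [pvLoopA, hneg, pvM, hz]
        omega
      · have h0 : 0 ≤ p + x := by omega
        have hmax : max 0 ((p + x) + pvM xs (p + x)) = (p + x) + pvM xs (p + x) :=
          max_eq_right (by have := pvM_nonneg xs (p + x); omega)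
        simp only [pvLoopA, hneg, if_false, pvM, hmax]
        rw [ih (p + x) (out + (p + x)) htail h0]
        ring

lemma pvNMax_cons (x : Int) (xs : List Int) (p : Int) (m : Nat) :
    pvNMax (x :: xs) p (m + 1) = max 0 ((p + x) + pvNMax xs (p + x) m) := by
  induction m with
  | zero => simp [pvNMax, pvWp]
  | succ m ih =>
      show max (pvNMax (x :: xs) p (m + 1)) (pvWp (x :: xs) p (m + 2)) = _
      rw [ih]
      show max (max 0 ((p + x) + pvNMax xs (p + x) m)) ((p + x) + pvWp xs (p + x) (m + 1)) = _
      rw [show pvNMax xs (p + x) (m + 1) = max (pvNMax xs (p + x) m) (pvWp xs (p + x) (m + 1)) from rfl]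
      rw [← max_add_add_left, max_assoc]

lemma pvM_eq_nmax (s : List Int) (p : Int) : pvM s p = pvNMax s p s.length := by
  induction s generalizing p with
  | nil => rfl
  | cons x xs ih =>
      rw [show (x :: xs).length = xs.length + 1 from rfl, pvNMax_cons, ← ih]
      rfl

lemma pvWp_succ (k : Nat) : ∀ (s : List Int) (p : Int), k < s.length →
    pvWp s p (k + 1) = pvWp s p k + (p + pvSN s (k + 1)) := by
  induction k with
  | zero =>
      intro s p h
      cases s with
      | nil => simp at h
      | cons x xs => simp [pvWp, pvSN]
  | succ k ih =>
      intro s p h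
      cases s with
      | nil => simp at h
      | cons x xs =>
          have hk : k < xs.length := by simpa using Nat.lt_of_succ_lt_succ h
          show (p + x) + pvWp xs (p + x) (k + 1) = ((p + x) + pvWp xs (p + x) k) + (p + pvSN (x :: xs) (k + 2))
          rw [ih xs (p + x) hk]
          have : pvSN (x :: xs) (k + 2) = x + pvSN xs (k + 1) := by simp [pvSN]
          rw [this]; ring

lemma pvWp_zero_eq_WW (s : List Int) (k : Nat) (hk : k ≤ s.length) : pvWp s 0 k = pvWW s k := by
  induction k with
  | zero => cases s <;> rfl
  | succ k ih =>
      rw [pvWp_succ k s 0 (by omega), ih (by omega)]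
      simp [pvWW]

lemma pvSum_range_getD (s : List Int) (k : Nat) (hk : k ≤ s.length) :
    ((List.range k).map (fun i => s.getD i 0)).sum = pvSN s k := by
  induction k with
  | zero => simp [pvSN]
  | succ k ih =>
      rw [List.range_succ, List.map_append, List.sum_append, ih (by omega)]
      have hk' : k < s.length := by omega
      have h2 : pvSN s (k + 1) = pvSN s k + s[k] := by
        simp only [pvSN, List.take_add_one, List.sum_append, List.getElem?_eq_getElem hk']
        simp
      simp [h2, List.getElem?_eq_getElem hk']

lemma pvTotalB_eq (s : List Int) (k : Nat) (hk : k ≤ s.length) :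
    pvTotalB s (k : Int) = pvWW s k := by
  have hfold : pvTotalB s (k : Int) =
      ((List.range k).map (fun i => s.getD i 0 * ((k : Int) - (i : Int)))).sum := by
    simp only [pvTotalB, PySem.List.foldl_add, PySem.List.pyRange_zero_nat, List.map_map]
    simp [Function.comp_def]
  rw [hfold]
  clear hfold
  induction k with
  | zero => rfl
  | succ k ih =>
      have step : ((List.range (k + 1)).map (fun i => s.getD i 0 * ((↑(k + 1) : Int) - (i : Int)))).sum
          = ((List.range k).map (fun i => s.getD i 0 * ((k : Int) - (i : Int)))).sum
            + ((List.range (k + 1)).map (fun i => s.getD i 0)).sum := by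
        rw [List.range_succ]
        simp only [List.map_append, List.sum_append, List.map_cons, List.map_nil,
          List.sum_cons, List.sum_nil]
        have hpt : ((List.range k).map (fun i => s.getD i 0 * ((↑(k + 1) : Int) - (i : Int))))
            = ((List.range k).map (fun i => s.getD i 0 * ((k : Int) - (i : Int)) + s.getD i 0)) := by
          apply List.map_congr_left
          intro i hi
          push_cast
          ring
        rw [hpt, List.sum_map_add]
        push_cast
        ring
      rw [step, ih (by omega), pvSum_range_getD s (k + 1) hk]
      rfl

lemma pvBfold (s : List Int) (m : Nat) (hm : m ≤ s.length) :
    (PySem.List.pyRange 1 ((m : Int) + 1)).foldl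
      (fun best k =>
        let total := pvTotalB s k
        if total > best then total else best) 0 = pvBMax s m := by
  induction m with
  | zero => rfl
  | succ m ih =>
      have hsplit : PySem.List.pyRange 1 ((↑(m + 1) : Int) + 1)
          = PySem.List.pyRange 1 ((m : Int) + 1) ++ [(m : Int) + 1] := by
        have := PySem.List.pyRange_one_succ_right (a := 1) (b := (m : Int) + 1) (by omega)
        push_cast
        push_cast at this
        convert this using 2
      rw [hsplit, List.foldl_append, ih (by omega)]
      have htot : pvTotalB s ((m : Int) + 1) = pvWW s (m + 1) := by
        have := pvTotalB_eq s (m + 1) hm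
        push_cast at this
        exact this
      simp only [List.foldl_cons, List.foldl_nil, htot]
      rfl

lemma pvBMax_eq_nmax (s : List Int) (m : Nat) (hm : m ≤ s.length) :
    pvBMax s m = pvNMax s 0 m := by
  induction m with
  | zero => rfl
  | succ m ih =>
      show (if pvWW s (m + 1) > pvBMax s m then pvWW s (m + 1) else pvBMax s m)
          = max (pvNMax s 0 m) (pvWp s 0 (m + 1))
      rw [ih (by omega), pvWp_zero_eq_WW s (m + 1) hm]
      by_cases h : pvWW s (m + 1) > pvNMax s 0 m
      · rw [if_pos h, max_eq_right (le_of_lt h)]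
      · rw [if_neg h, max_eq_left (by omega)]

-- ===== VERDICT (by name: the statement is the Claim_ definition above) =====
theorem maxSatisfaction_spec : Claim_equal_maxSatisfaction := by
  intro satisfaction _
  unfold Spec_maxSatisfaction maxSatisfaction maxSatisfaction_alt
  set s := PySem.List.sorted satisfaction (fun x => x) true with hs
  have hsort : s.Pairwise (fun a b => b ≤ a) :=
    PySem.List.sorted_pairwise_rev satisfaction (fun x => x)
  have hA : pvLoopA s 0 0 = pvM s 0 := by
    rw [pvLoopA_eq s 0 0 hsort le_rfl]
    omega
  have hB : (PySem.List.pyRange 1 (PySem.List.len s + 1)).foldl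
      (fun best k =>
        let total := pvTotalB s k
        if total > best then total else best) 0 = pvBMax s s.length := by
    have := pvBfold s s.length le_rfl
    simpa [PySem.List.len_eq] using this
  rw [hA, hB, pvBMax_eq_nmax s s.length le_rfl, ← pvM_eq_nmax]
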